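-- pv_equiv track=rewrite | github.com/RobertMarch/AdventOfCode2020 | advent06a.py | solve
-- ===== SOURCE A (Python) =====
-- def solve(input):
--     count = 0
--     answer_set = set()
--     for line in input.split('\n'):
--         if len(line.strip()) > 0:
--             for ans in line:
--                 answer_set.add(ans)
--         else:
--             count += len(answer_set)
--             answer_set.clear()
--     return count
-- ===== SOURCE B (Python) =====
-- def solve(input):
--     groups = []
--     current = []
--     for line in input.split('\n'):
--         if line.strip():
--             current.append(line)
--         else:
--             groups.append(current)
--             current = []
--     return sum(len(set(''.join(g))) for g in groups)
-- ===== Notes on version B (the rewrite author's own statement) =====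
-- stated objective: alternative
-- what changed: Instead of maintaining one running set and counter in a single loop, B first partitions the lines into completed groups (a group is closed by each blank line; the trailing unclosed group is dropped, as in A) and then sums the distinct-character count of each joined group.
import Mathlib
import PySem

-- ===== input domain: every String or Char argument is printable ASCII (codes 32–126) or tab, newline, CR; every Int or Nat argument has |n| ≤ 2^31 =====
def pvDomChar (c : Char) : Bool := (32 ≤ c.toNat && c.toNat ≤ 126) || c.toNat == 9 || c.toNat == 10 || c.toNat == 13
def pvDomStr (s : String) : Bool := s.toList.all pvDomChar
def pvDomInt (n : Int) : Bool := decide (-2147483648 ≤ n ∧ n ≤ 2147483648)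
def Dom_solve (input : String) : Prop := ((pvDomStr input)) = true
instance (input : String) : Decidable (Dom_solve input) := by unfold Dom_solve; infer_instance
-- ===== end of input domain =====

-- B partitions the lines into completed groups and sums per-group distinct counts,
-- instead of A's single running set+counter loop (objective: alternative decomposition).

-- ===== PORT A =====
def solve (input : String) : Int :=
  (((PySem.Str.split? input "\n").getD []).foldl
    (fun (st : Int × PySem.Set Char) line =>
      if PySem.Str.len (PySem.Str.strip line) > 0 then
        (st.1, line.toList.foldl PySem.Set.add st.2)
      else
        (st.1 + PySem.Set.len st.2, PySem.Set.empty))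
    (0, PySem.Set.empty)).1

-- ===== PORT B =====
def solve_alt (input : String) : Int :=
  let st := ((PySem.Str.split? input "\n").getD []).foldl
    (fun (st : List (List String) × List String) line =>
      if (PySem.Str.strip line) ≠ "" then
        (st.1, st.2 ++ [line])
      else
        (st.1 ++ [st.2], []))
    ([], [])
  (st.1.map (fun g => PySem.Set.len (PySem.Set.ofList (PySem.Str.join "" g).toList))).sum

-- ===== PRECONDITION & SPEC =====
def Spec_solve (input : String) (out : Int) : Prop := out = solve_alt input
instance (input : String) (out : Int) : Decidable (Spec_solve input out) := by unfold Spec_solve; infer_instance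

-- ===== CLAIM (what is proved, stated in full; the proofs are below) =====
def Claim_equal_solve : Prop := ∀ (input : String), Dom_solve input → Spec_solve input (solve input)

-- ===== LEMMAS AND PROOFS =====

-- distinct-count of a group, the summand of B
def pvF (g : List String) : Int :=
  PySem.Set.len (PySem.Set.ofList (PySem.Str.join "" g).toList)

lemma pv_joinE_append (a : List (List Char)) (b : List Char) :
    PySem.Chars.join [] (a ++ [b]) = PySem.Chars.join [] a ++ b := by
  induction a with
  | nil => simp [PySem.Chars.join_singleton, PySem.Chars.join_nil]
  | cons p rest ih =>
    cases rest with
    | nil =>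
      simp [PySem.Chars.join_cons_cons, PySem.Chars.join_singleton]
    | cons q t =>
      simp only [List.cons_append, PySem.Chars.join_cons_cons] at ih ⊢
      simp [ih]

lemma pv_join_append (cur : List String) (l : String) :
    (PySem.Str.join "" (cur ++ [l])).toList
      = (PySem.Str.join "" cur).toList ++ l.toList := by
  simp only [PySem.Str.toList_join, List.map_append, List.map_cons, List.map_nil]
  have h : ("" : String).toList = [] := rfl
  rw [h, pv_joinE_append]

lemma pv_strip_len_pos (l : String) :
    (PySem.Str.len (PySem.Str.strip l) > 0) ↔ (PySem.Str.strip l ≠ "") := by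
  rw [PySem.Str.len_eq]
  constructor
  · intro h he
    rw [he] at h
    simp at h
  · intro h
    have : (PySem.Str.strip l).toList ≠ [] := by
      intro he
      have h2 := congrArg String.ofList he
      rw [String.ofList_toList] at h2
      exact h h2
    have := List.length_pos_iff.mpr this
    omega

lemma pv_main (ls : List String) (c : Int) (gs : List (List String)) (cur : List String)
    (hc : c = (gs.map pvF).sum) :
    (ls.foldl
      (fun (st : Int × PySem.Set Char) line =>
        if PySem.Str.len (PySem.Str.strip line) > 0 then
          (st.1, line.toList.foldl PySem.Set.add st.2)
        else
          (st.1 + PySem.Set.len st.2, PySem.Set.empty))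
      (c, PySem.Set.ofList (PySem.Str.join "" cur).toList)).1
    = (((ls.foldl
      (fun (st : List (List String) × List String) line =>
        if (PySem.Str.strip line) ≠ "" then
          (st.1, st.2 ++ [line])
        else
          (st.1 ++ [st.2], []))
      (gs, cur)).1).map pvF).sum := by
  induction ls generalizing c gs cur with
  | nil => simpa using hc
  | cons l t ih =>
    by_cases h : PySem.Str.strip l = ""
    · have hA : ¬ (PySem.Str.len (PySem.Str.strip l) > 0) := by
        rw [pv_strip_len_pos]; simp [h]
      simp only [List.foldl_cons, if_neg hA, if_neg (by simp [h] : ¬ (PySem.Str.strip l ≠ ""))]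
      have h2 := ih (c + PySem.Set.len (PySem.Set.ofList (PySem.Str.join "" cur).toList))
        (gs ++ [cur]) [] (by simp [hc, pvF])
      simpa using h2
    · have hA : PySem.Str.len (PySem.Str.strip l) > 0 := (pv_strip_len_pos l).mpr h
      simp only [List.foldl_cons, if_pos hA, if_pos h]
      have hset : l.toList.foldl PySem.Set.add
            (PySem.Set.ofList (PySem.Str.join "" cur).toList)
          = PySem.Set.ofList (PySem.Str.join "" (cur ++ [l])).toList := by
        rw [pv_join_append, PySem.Set.ofList_eq_foldl, PySem.Set.ofList_eq_foldl,
          List.foldl_append]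
      rw [hset, ih c gs (cur ++ [l]) hc]

-- ===== VERDICT (by name: the statement is the Claim_ definition above) =====
theorem solve_spec : Claim_equal_solve := by
  intro input _
  unfold Spec_solve solve solve_alt
  have h := pv_main ((PySem.Str.split? input "\n").getD []) 0 [] [] (by simp)
  unfold pvF at h
  simpa using h
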